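-- pv_equiv track=rewrite | github.com/Reza-rn/ServiceRestoration-Distributed | src/Functions.py | FindBusNeighborPDElements
-- ===== SOURCE A (Python) =====
-- def FindBusNeighborPDElements(AllBuses, PDElementsConnections):
--     Neighbor={}
--     for i in AllBuses:
--         for j, k in PDElementsConnections.items():
--             if (k[0] == i) or (k[1] == i):
--                 if i in Neighbor:
--                     Neighbor[i].append(j)
--                 else:
--                     Neighbor[i] = [j]
--
--     return Neighbor
-- ===== SOURCE B (Python) =====
-- def FindBusNeighborPDElements(AllBuses, PDElementsConnections):
--     # One pass over the elements builds a bus -> incident element index,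
--     # then one pass over AllBuses assembles the result.
--     Incidence = {}
--     for j, k in PDElementsConnections.items():
--         Incidence.setdefault(k[0], []).append(j)
--         if k[1] != k[0]:
--             Incidence.setdefault(k[1], []).append(j)
--     Neighbor = {}
--     for i in AllBuses:
--         if i in Incidence:
--             if i in Neighbor:
--                 Neighbor[i].extend(Incidence[i])
--             else:
--                 Neighbor[i] = list(Incidence[i])
--     return Neighbor
-- ===== Notes on version B (the rewrite author's own statement) =====
-- stated objective: faster
-- what changed: Replaces A's bus-times-element double loop by a single bucketing pass over the elements (bus -> incident element keys) followed by one pass over the buses, O(B*E) -> O(B+E).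
-- outside the precondition, e.g. on FindBusNeighborPDElements([], {0: [1]}): A returns {}, B raises IndexError
import Mathlib
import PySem

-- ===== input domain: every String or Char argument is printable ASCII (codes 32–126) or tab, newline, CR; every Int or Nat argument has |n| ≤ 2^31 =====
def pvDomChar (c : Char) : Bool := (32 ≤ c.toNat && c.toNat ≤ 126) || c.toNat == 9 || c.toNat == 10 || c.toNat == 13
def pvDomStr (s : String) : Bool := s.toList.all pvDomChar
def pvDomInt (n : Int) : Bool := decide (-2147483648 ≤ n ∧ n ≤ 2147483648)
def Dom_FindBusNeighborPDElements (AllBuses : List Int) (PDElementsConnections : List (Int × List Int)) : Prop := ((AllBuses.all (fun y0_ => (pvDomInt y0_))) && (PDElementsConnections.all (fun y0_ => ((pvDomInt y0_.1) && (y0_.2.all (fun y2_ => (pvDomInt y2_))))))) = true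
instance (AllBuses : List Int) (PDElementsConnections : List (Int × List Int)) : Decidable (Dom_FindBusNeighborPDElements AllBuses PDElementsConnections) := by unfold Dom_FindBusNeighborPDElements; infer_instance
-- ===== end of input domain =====

-- B replaces A's bus×element double loop by one bucketing pass over the elements plus one
-- pass over the buses (asymptotically faster); return values are proved equal on Pre_.

-- ===== PORT A =====
-- Literal port of A: outer loop over AllBuses, inner loop over the dict's items;
-- k[0]/k[1] are taken by pattern match (a connection list shorter than 2 makes Python
-- raise IndexError; such inputs are excluded by Pre_ below).
def FindBusNeighborPDElements (AllBuses : List Int) (PDElementsConnections : List (Int × List Int)) : List (Int × List Int) :=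
  (AllBuses.foldl (fun Neighbor i =>
    PDElementsConnections.foldl (fun Neighbor jk =>
      match jk.2 with
      | k0 :: k1 :: _ =>
        if k0 = i ∨ k1 = i then
          match Neighbor.get? i with
          | some l => Neighbor.insert i (l ++ [jk.1])   -- Neighbor[i].append(j)
          | none   => Neighbor.insert i [jk.1]          -- Neighbor[i] = [j]
        else Neighbor
      | _ => Neighbor)  -- k[0]/k[1] would raise IndexError (outside Pre_)
      Neighbor) (PySem.Dict.empty)).items

-- ===== PORT B =====
-- Literal port of Source B: build Incidence (bus -> element keys) in one pass
-- (setdefault(..).append = modify with default []), then assemble Neighbor over AllBuses.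
def FindBusNeighborPDElements_alt (AllBuses : List Int) (PDElementsConnections : List (Int × List Int)) : List (Int × List Int) :=
  let Incidence := PDElementsConnections.foldl (fun d jk =>
    match jk.2 with
    | [] => d        -- k[0] would raise IndexError (outside Pre_)
    | [_] => d       -- k[1] would raise IndexError (outside Pre_)
    | k0 :: k1 :: _ =>
      let d := d.modify k0 [] (fun l => l ++ [jk.1])
      if k1 ≠ k0 then d.modify k1 [] (fun l => l ++ [jk.1]) else d)
    PySem.Dict.empty
  (AllBuses.foldl (fun Neighbor i =>
    if Incidence.contains i then
      match Neighbor.get? i with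
      | none     => Neighbor.insert i (Incidence.getD i [])          -- Neighbor[i] = list(Incidence[i])
      | some old => Neighbor.insert i (old ++ Incidence.getD i [])  -- Neighbor[i].extend(Incidence[i])
    else Neighbor) (PySem.Dict.empty)).items

-- ===== PRECONDITION & SPEC =====
-- Pre_ excludes inputs where some connection list has fewer than 2 entries: there Python A
-- raises IndexError (except in the corner AllBuses = [], where A returns {} without ever
-- indexing but B's bucketing prepass still raises).
def Pre_FindBusNeighborPDElements (AllBuses : List Int) (PDElementsConnections : List (Int × List Int)) : Prop :=
  ∀ p ∈ PDElementsConnections, 2 ≤ p.2.length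
instance (AllBuses : List Int) (PDElementsConnections : List (Int × List Int)) : Decidable (Pre_FindBusNeighborPDElements AllBuses PDElementsConnections) := by unfold Pre_FindBusNeighborPDElements; infer_instance
def pvWitness_FindBusNeighborPDElements : List Int × (List (Int × List Int)) := ([1, 2, 3], [(0, [1, 2]), (1, [2, 3]), (2, [3, 3])])

def Spec_FindBusNeighborPDElements (AllBuses : List Int) (PDElementsConnections : List (Int × List Int)) (out : List (Int × List Int)) : Prop := out = FindBusNeighborPDElements_alt AllBuses PDElementsConnections
instance (AllBuses : List Int) (PDElementsConnections : List (Int × List Int)) (out : List (Int × List Int)) : Decidable (Spec_FindBusNeighborPDElements AllBuses PDElementsConnections out) := by unfold Spec_FindBusNeighborPDElements; infer_instance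

-- ===== CLAIM (what is proved, stated in full; the proofs are below) =====
def Claim_equal_FindBusNeighborPDElements : Prop := ∀ (AllBuses : List Int) (PDElementsConnections : List (Int × List Int)), Dom_FindBusNeighborPDElements AllBuses PDElementsConnections → Pre_FindBusNeighborPDElements AllBuses PDElementsConnections → Spec_FindBusNeighborPDElements AllBuses PDElementsConnections (FindBusNeighborPDElements AllBuses PDElementsConnections)

-- ===== LEMMAS AND PROOFS =====

-- named copies of the three loop bodies (definitionally equal to the lambdas in the ports)
def pvAStep (i : Int) (Neighbor : PySem.Dict Int (List Int)) (jk : Int × List Int) : PySem.Dict Int (List Int) :=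
  match jk.2 with
  | k0 :: k1 :: _ =>
    if k0 = i ∨ k1 = i then
      match Neighbor.get? i with
      | some l => Neighbor.insert i (l ++ [jk.1])
      | none   => Neighbor.insert i [jk.1]
    else Neighbor
  | _ => Neighbor

def pvIncStep (d : PySem.Dict Int (List Int)) (jk : Int × List Int) : PySem.Dict Int (List Int) :=
  match jk.2 with
  | [] => d
  | [_] => d
  | k0 :: k1 :: _ =>
    let d := d.modify k0 [] (fun l => l ++ [jk.1])
    if k1 ≠ k0 then d.modify k1 [] (fun l => l ++ [jk.1]) else d

def pvBStep (Inc Neighbor : PySem.Dict Int (List Int)) (i : Int) : PySem.Dict Int (List Int) :=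
  if Inc.contains i then
    match Neighbor.get? i with
    | none     => Neighbor.insert i (Inc.getD i [])
    | some old => Neighbor.insert i (old ++ Inc.getD i [])
  else Neighbor

-- the element keys incident to bus i, in element order
def pvMlist (i : Int) : List (Int × List Int) → List Int
  | [] => []
  | jk :: rest =>
    match jk.2 with
    | k0 :: k1 :: _ => if k0 = i ∨ k1 = i then jk.1 :: pvMlist i rest else pvMlist i rest
    | _ => pvMlist i rest

-- the common "append l to the bucket of i" dict update
def pvUpd (N : PySem.Dict Int (List Int)) (i : Int) (l : List Int) : PySem.Dict Int (List Int) :=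
  match N.get? i with
  | some old => N.insert i (old ++ l)
  | none     => N.insert i l

theorem pvUpd_pvUpd (N : PySem.Dict Int (List Int)) (i : Int) (l l' : List Int) :
    pvUpd (pvUpd N i l) i l' = pvUpd N i (l ++ l') := by
  unfold pvUpd
  cases h : N.get? i with
  | some old => simp [PySem.Dict.get?_insert_self, PySem.Dict.insert_insert_self]
  | none => simp [PySem.Dict.get?_insert_self, PySem.Dict.insert_insert_self]

-- A's inner loop over the elements is pvUpd with the incident list (or a no-op)
theorem foldl_pvAStep (pairs : List (Int × List Int)) (i : Int) (N : PySem.Dict Int (List Int)) :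
    List.foldl (pvAStep i) N pairs
      = (match pvMlist i pairs with | [] => N | l => pvUpd N i l) := by
  induction pairs generalizing N with
  | nil => rfl
  | cons jk rest ih =>
    rw [List.foldl_cons, ih]
    cases hk : jk.2 with
    | nil =>
      have ha : pvAStep i N jk = N := by simp [pvAStep, hk]
      rw [ha]; simp [pvMlist, hk]
    | cons k0 t =>
      cases t with
      | nil =>
        have ha : pvAStep i N jk = N := by simp [pvAStep, hk]
        rw [ha]; simp [pvMlist, hk]
      | cons k1 t' =>
        by_cases hm : k0 = i ∨ k1 = i
        · have ha : pvAStep i N jk = pvUpd N i [jk.1] := by simp [pvAStep, hk, hm, pvUpd]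
          rw [ha]
          cases hr : pvMlist i rest with
          | nil => simp [pvMlist, hk, hm, hr]
          | cons a r => simp [pvMlist, hk, hm, hr, pvUpd_pvUpd]
        · have ha : pvAStep i N jk = N := by simp [pvAStep, hk, hm]
          rw [ha]; simp [pvMlist, hk, hm]

-- B's Incidence prepass: bucket of i holds exactly pvMlist i (appended to what was there)
theorem getD_foldl_pvIncStep (pairs : List (Int × List Int)) (i : Int) (d : PySem.Dict Int (List Int)) :
    (List.foldl pvIncStep d pairs).getD i [] = d.getD i [] ++ pvMlist i pairs := by
  induction pairs generalizing d with
  | nil => simp [pvMlist]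
  | cons jk rest ih =>
    rw [List.foldl_cons]
    cases hk : jk.2 with
    | nil =>
      have hd : pvIncStep d jk = d := by simp [pvIncStep, hk]
      rw [hd, ih]; simp [pvMlist, hk]
    | cons k0 t =>
      cases t with
      | nil =>
        have hd : pvIncStep d jk = d := by simp [pvIncStep, hk]
        rw [hd, ih]; simp [pvMlist, hk]
      | cons k1 t' =>
        by_cases h10 : k1 = k0
        · have hd : pvIncStep d jk = d.modify k0 [] (fun l => l ++ [jk.1]) := by
            simp [pvIncStep, hk, h10]
          rw [hd, ih, PySem.Dict.getD_modify]
          by_cases h0 : i = k0 <;> simp_all [pvMlist, eq_comm]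
        · have hd : pvIncStep d jk
              = (d.modify k0 [] (fun l => l ++ [jk.1])).modify k1 [] (fun l => l ++ [jk.1]) := by
            simp [pvIncStep, hk, h10]
          rw [hd, ih, PySem.Dict.getD_modify, PySem.Dict.getD_modify]
          by_cases h0 : i = k0 <;> by_cases h1 : i = k1 <;>
            simp_all [pvMlist, PySem.Dict.getD_modify, eq_comm]
    
theorem contains_foldl_pvIncStep (pairs : List (Int × List Int)) (i : Int) (d : PySem.Dict Int (List Int)) :
    (List.foldl pvIncStep d pairs).contains i = (d.contains i || !(pvMlist i pairs).isEmpty) := by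
  induction pairs generalizing d with
  | nil => simp [pvMlist]
  | cons jk rest ih =>
    rw [List.foldl_cons]
    cases hk : jk.2 with
    | nil =>
      have hd : pvIncStep d jk = d := by simp [pvIncStep, hk]
      rw [hd, ih]; simp [pvMlist, hk]
    | cons k0 t =>
      cases t with
      | nil =>
        have hd : pvIncStep d jk = d := by simp [pvIncStep, hk]
        rw [hd, ih]; simp [pvMlist, hk]
      | cons k1 t' =>
        by_cases h10 : k1 = k0
        · have hd : pvIncStep d jk = d.modify k0 [] (fun l => l ++ [jk.1]) := by
            simp [pvIncStep, hk, h10]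
          rw [hd, ih, PySem.Dict.contains_modify]
          by_cases h0 : i = k0
          · subst h0; simp [pvMlist, hk]
          · have hb0 : (i == k0) = false := by simp [h0]
            simp [pvMlist, hk, hb0, h10, eq_comm, h0]
        · have hd : pvIncStep d jk
              = (d.modify k0 [] (fun l => l ++ [jk.1])).modify k1 [] (fun l => l ++ [jk.1]) := by
            simp [pvIncStep, hk, h10]
          rw [hd, ih, PySem.Dict.contains_modify, PySem.Dict.contains_modify]
          by_cases h0 : i = k0 <;> by_cases h1 : i = k1
          · subst h0; simp [pvMlist, hk]
          · subst h0; simp [pvMlist, hk, Bool.or_comm]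
          · subst h1; simp [pvMlist, hk]
          · have hb0 : (i == k0) = false := by simp [h0]
            have hb1 : (i == k1) = false := by simp [h1]
            simp [pvMlist, hk, hb0, hb1, eq_comm, h0, h1]

-- the two per-bus updates coincide
theorem pvStep_eq (pairs : List (Int × List Int)) (i : Int) (N : PySem.Dict Int (List Int)) :
    List.foldl (pvAStep i) N pairs
      = pvBStep (List.foldl pvIncStep PySem.Dict.empty pairs) N i := by
  rw [foldl_pvAStep]
  unfold pvBStep
  rw [contains_foldl_pvIncStep, getD_foldl_pvIncStep]
  cases hr : pvMlist i pairs with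
  | nil => simp
  | cons a r => simp only [pvUpd]; cases N.get? i <;> rfl

theorem pvMain (AllBuses : List Int) (pairs : List (Int × List Int)) (N : PySem.Dict Int (List Int)) :
    List.foldl (fun Neighbor i => List.foldl (pvAStep i) Neighbor pairs) N AllBuses
      = List.foldl (pvBStep (List.foldl pvIncStep PySem.Dict.empty pairs)) N AllBuses := by
  induction AllBuses generalizing N with
  | nil => rfl
  | cons i rest ih => rw [List.foldl_cons, List.foldl_cons, pvStep_eq]; exact ih _

-- ===== VERDICT (by name: the statement is the Claim_ definition above) =====
theorem FindBusNeighborPDElements_spec : Claim_equal_FindBusNeighborPDElements := by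
  intro AllBuses pairs _ _
  unfold Spec_FindBusNeighborPDElements FindBusNeighborPDElements FindBusNeighborPDElements_alt
  show (List.foldl (fun Neighbor i => List.foldl (pvAStep i) Neighbor pairs) PySem.Dict.empty AllBuses).items
      = (List.foldl (pvBStep (List.foldl pvIncStep PySem.Dict.empty pairs)) PySem.Dict.empty AllBuses).items
  exact congrArg PySem.Dict.items (pvMain AllBuses pairs PySem.Dict.empty)
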